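-- pv_equiv track=rewrite | github.com/helibene/l-system-curve | sequence.py | sequenceToBinary
-- ===== SOURCE A (Python) =====
-- def sequenceToBinary(sequence) :
--     seqMin = min(sequence)
--     seqMax = max(sequence)
--     binarySequence = []
--     for i in range(seqMin,seqMax) :
--         if i in sequence :
--             #if i%2==0 :
--             binarySequence.append(1)
--             #else :
--             #    binarySequence.append(0)
--         else :
--             binarySequence.append(-1)
--     return binarySequence
-- ===== SOURCE B (Python) =====
-- def sequenceToBinary(sequence):
--     seqMin = min(sequence)
--     seqMax = max(sequence)
--     binarySequence = [-1] * (seqMax - seqMin)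
--     for v in sequence:
--         if v != seqMax:
--             binarySequence[v - seqMin] = 1
--     return binarySequence
-- ===== Notes on version B (the rewrite author's own statement) =====
-- stated objective: faster
-- what changed: Instead of scanning range(min,max) and testing membership with 'in' at every index (quadratic), B preallocates a default mask of length max-min filled with minus-one and makes one pass over the sequence scattering 1 at index v-min for each non-max element.
import Mathlib
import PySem

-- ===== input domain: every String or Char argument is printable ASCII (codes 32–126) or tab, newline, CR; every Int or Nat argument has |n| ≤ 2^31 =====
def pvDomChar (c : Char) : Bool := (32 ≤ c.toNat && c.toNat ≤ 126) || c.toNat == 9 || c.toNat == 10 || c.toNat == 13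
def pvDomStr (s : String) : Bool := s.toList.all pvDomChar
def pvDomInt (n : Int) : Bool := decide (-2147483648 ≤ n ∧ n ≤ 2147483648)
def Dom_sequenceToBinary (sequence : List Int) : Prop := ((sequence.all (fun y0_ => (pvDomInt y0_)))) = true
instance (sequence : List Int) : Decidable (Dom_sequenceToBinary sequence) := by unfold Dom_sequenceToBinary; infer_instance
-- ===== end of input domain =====

-- B replaces A's range-scan-with-membership-test by a preallocated -1 mask with one scatter pass (faster).


-- ===== PORT A =====
def sequenceToBinary (sequence : List Int) : List Int :=
  match PySem.List.min? sequence (fun x => x), PySem.List.max? sequence (fun x => x) with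
  | some seqMin, some seqMax =>
      (PySem.List.pyRange seqMin seqMax 1).foldl
        (fun acc i => acc ++ [if sequence.contains i then (1 : Int) else -1]) []
  | _, _ => []

-- ===== PORT B =====
def sequenceToBinary_alt (sequence : List Int) : List Int :=
  (PySem.List.min? sequence (fun x => x)).elim [] (fun seqMin =>
    (PySem.List.max? sequence (fun x => x)).elim [] (fun seqMax =>
      sequence.foldl
        (fun out v => if v ≠ seqMax then PySem.List.pySetD out (v - seqMin) 1 else out)
        (List.replicate (seqMax - seqMin).toNat (-1))))

-- ===== PRECONDITION & SPEC =====
-- Pre_ excludes only the empty list, on which Python's min (in A and in B) raises ValueError.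
def Pre_sequenceToBinary (sequence : List Int) : Prop := sequence ≠ []
instance (sequence : List Int) : Decidable (Pre_sequenceToBinary sequence) := by unfold Pre_sequenceToBinary; infer_instance
def pvWitness_sequenceToBinary : List Int := [3, 1, 5, 1]
def Spec_sequenceToBinary (sequence : List Int) (out : List Int) : Prop := out = sequenceToBinary_alt sequence
instance (sequence : List Int) (out : List Int) : Decidable (Spec_sequenceToBinary sequence out) := by unfold Spec_sequenceToBinary; infer_instance

-- ===== CLAIM (what is proved, stated in full; the proofs are below) =====
def Claim_equal_sequenceToBinary : Prop := ∀ (sequence : List Int), Dom_sequenceToBinary sequence → Pre_sequenceToBinary sequence → Spec_sequenceToBinary sequence (sequenceToBinary sequence)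

-- ===== LEMMAS AND PROOFS =====

theorem pv_foldl_append_map {α β : Type} (f : α → β) (l : List α) (acc : List β) :
    l.foldl (fun a i => a ++ [f i]) acc = acc ++ l.map f := by
  induction l generalizing acc with
  | nil => simp
  | cons x t ih => simp [List.foldl, ih]

theorem pv_scatter_get (seqMin seqMax : Int) (l : List Int) (init : List Int)
    (hmin : ∀ v ∈ l, seqMin ≤ v) (k : Nat) :
    (l.foldl (fun out v => if v ≠ seqMax then PySem.List.pySetD out (v - seqMin) 1 else out)
      init)[k]? =
    if (∃ v ∈ l, v ≠ seqMax ∧ v = seqMin + (k : Int)) ∧ k < init.length then some 1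
    else init[k]? := by
  induction l generalizing init with
  | nil => simp
  | cons v t ih =>
      simp only [List.foldl]
      rw [ih _ (fun w hw => hmin w (List.mem_cons_of_mem _ hw))]
      by_cases hv : v ≠ seqMax
      · have hnn : (0 : Int) ≤ v - seqMin := by
          have := hmin v List.mem_cons_self
          omega
        rw [if_pos hv, PySem.List.pySetD_of_nonneg init 1 hnn]
        simp only [List.length_set]
        by_cases hvk : v = seqMin + (k : Int)
        · have hk : (v - seqMin).toNat = k := by omega
          have hP : ∃ w ∈ v :: t, w ≠ seqMax ∧ w = seqMin + (k : Int) :=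
            ⟨v, List.mem_cons_self, hv, hvk⟩
          by_cases hex : (∃ w ∈ t, w ≠ seqMax ∧ w = seqMin + (k : Int)) ∧ k < init.length
          · rw [if_pos hex, if_pos ⟨hP, hex.2⟩]
          · rw [if_neg hex]
            by_cases hlen : k < init.length
            · rw [hk, List.getElem?_set_self hlen, if_pos ⟨hP, hlen⟩]
            · rw [hk, List.set_eq_of_length_le (by omega), if_neg (fun h => hlen h.2)]
        · have hset : (init.set (v - seqMin).toNat 1)[k]? = init[k]? :=
            List.getElem?_set_ne (by omega)
          rw [hset]
          congr 1
          simp only [eq_iff_iff, and_congr_left_iff]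
          intro _
          constructor
          · rintro ⟨w, hw, ha, hb⟩
            exact ⟨w, List.mem_cons_of_mem _ hw, ha, hb⟩
          · rintro ⟨w, hw, ha, hb⟩
            rcases List.mem_cons.mp hw with rfl | hw'
            · exact absurd hb hvk
            · exact ⟨w, hw', ha, hb⟩
      · rw [if_neg hv]
        rw [not_not] at hv
        congr 1
        simp only [eq_iff_iff, and_congr_left_iff]
        intro _
        constructor
        · rintro ⟨w, hw, ha, hb⟩
          exact ⟨w, List.mem_cons_of_mem _ hw, ha, hb⟩
        · rintro ⟨w, hw, ha, hb⟩
          rcases List.mem_cons.mp hw with rfl | hw'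
          · exact absurd hv ha
          · exact ⟨w, hw', ha, hb⟩

-- ===== VERDICT (by name: the statement is the Claim_ definition above) =====
theorem sequenceToBinary_spec : Claim_equal_sequenceToBinary := by
  intro sequence _ hpre
  unfold Spec_sequenceToBinary sequenceToBinary sequenceToBinary_alt
  cases hmin : PySem.List.min? sequence (fun x => x) with
  | none => exact absurd ((PySem.List.min?_eq_none_iff sequence _).mp hmin) hpre
  | some seqMin =>
  cases hmax : PySem.List.max? sequence (fun x => x) with
  | none => exact absurd ((PySem.List.max?_eq_none_iff sequence _).mp hmax) hpre
  | some seqMax =>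
  simp only [hmin, hmax, Option.elim]
  have hlo : ∀ v ∈ sequence, seqMin ≤ v := fun v hv => PySem.List.min?_isMin hmin v hv
  rw [pv_foldl_append_map, List.nil_append, PySem.List.pyRange_one]
  apply List.ext_getElem?
  intro k
  rw [pv_scatter_get seqMin seqMax sequence _ hlo k]
  simp only [List.length_replicate]
  by_cases hk : k < (seqMax - seqMin).toNat
  · rw [List.getElem?_map, List.getElem?_map, List.getElem?_range hk]
    simp only [Option.map_some]
    by_cases hmem : (seqMin + (k : Int)) ∈ sequence
    · have hP : (∃ v ∈ sequence, v ≠ seqMax ∧ v = seqMin + (k : Int)) ∧ k < (seqMax - seqMin).toNat :=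
        ⟨⟨seqMin + (k : Int), hmem, by omega, rfl⟩, hk⟩
      rw [if_pos hP, if_pos (by simpa using hmem)]
    · have hP : ¬ ((∃ v ∈ sequence, v ≠ seqMax ∧ v = seqMin + (k : Int)) ∧ k < (seqMax - seqMin).toNat) := by
        rintro ⟨⟨w, hw, _, rfl⟩, _⟩
        exact hmem hw
      rw [if_neg hP, if_neg (by simpa using hmem)]
      simp [hk]
  · rw [if_neg (by omega),
      List.getElem?_eq_none (by simp only [List.length_map, List.length_range]; omega),
      List.getElem?_eq_none (by simp only [List.length_replicate]; omega)]
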